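-- pv_equiv track=rewrite | github.com/rizveeerprojects/DownloadTube | Code.py | ClearName
-- ===== SOURCE A (Python) =====
-- import string
--
-- def ClearName(name):
--     new_name = ""
--     for i in range(0,len(name)):
--         if(name[i] in string.punctuation):
--             new_name=new_name+"-"
--         else:
--             new_name=new_name+name[i]
--     return new_name
-- ===== SOURCE B (Python) =====
-- import string
--
-- def ClearName(name):
--     # staged passes: one whole-string replace per punctuation character
--     for p in string.punctuation:
--         name = name.replace(p, "-")
--     return name
-- ===== Notes on version B (the rewrite author's own statement) =====
-- stated objective: faster
-- what changed: Instead of A's index loop over the string with a per-character membership scan of string.punctuation and repeated string concatenation, B iterates over the 32 punctuation characters and performs one whole-string str.replace pass per character; correctness holds because the dash replacement is itself left fixed by every later pass.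
import Mathlib
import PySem

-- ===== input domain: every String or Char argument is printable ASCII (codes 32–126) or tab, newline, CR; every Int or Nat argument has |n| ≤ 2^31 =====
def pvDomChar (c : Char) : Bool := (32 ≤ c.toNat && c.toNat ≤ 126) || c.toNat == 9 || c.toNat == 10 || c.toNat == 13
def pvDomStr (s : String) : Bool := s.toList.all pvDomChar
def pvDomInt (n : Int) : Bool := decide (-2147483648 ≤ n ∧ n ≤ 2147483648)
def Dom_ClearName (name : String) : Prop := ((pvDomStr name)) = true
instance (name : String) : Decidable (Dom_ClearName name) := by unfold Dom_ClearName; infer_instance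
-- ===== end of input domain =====

-- B replaces A's per-index loop by staged whole-string replace passes, one per punctuation character (alternative decomposition; return value only).

-- ===== PORT A =====
-- string.punctuation
def punctChars : List Char := "!\"#$%&'()*+,-./:;<=>?@[\\]^_`{|}~".toList

-- literal port of A's index loop; 'name[i] in string.punctuation' for the single
-- character name[i] is membership in punctChars; the string is built char by char
def ClearName (name : String) : String :=
  String.ofList ((PySem.List.pyRange 0 (PySem.Str.len name) 1).foldl
    (fun acc i =>
      if punctChars.contains (PySem.List.pyGetD name.toList i ' ')
      then acc ++ ['-']
      else acc ++ [PySem.List.pyGetD name.toList i ' ']) [])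

-- ===== PORT B =====
-- for p in string.punctuation: name = name.replace(p, "-")
def ClearName_alt (name : String) : String :=
  punctChars.foldl (fun s p => PySem.Str.replace s (String.ofList [p]) "-") name

-- ===== PRECONDITION & SPEC =====
def Spec_ClearName (name : String) (out : String) : Prop := out = ClearName_alt name
instance (name : String) (out : String) : Decidable (Spec_ClearName name out) := by unfold Spec_ClearName; infer_instance

-- ===== CLAIM (what is proved, stated in full; the proofs are below) =====
def Claim_equal_ClearName : Prop := ∀ (name : String), Dom_ClearName name → Spec_ClearName name (ClearName name)

-- ===== LEMMAS AND PROOFS =====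

-- single-character replace is a character map (by induction on the fuel recursion)
theorem replace_go_single (p q : Char) :
    ∀ (l : List Char) (fuel : Nat) (acc : List Char), l.length ≤ fuel →
    PySem.Chars.replace.go [p] [q] fuel l acc
      = acc.reverse ++ l.map (fun c => if c = p then q else c) := by
  intro l
  induction l with
  | nil =>
    intro fuel acc _
    cases fuel <;> simp [PySem.Chars.replace.go]
  | cons c t ih =>
    intro fuel acc h
    cases fuel with
    | zero => simp at h
    | succ f =>
      have h' : t.length ≤ f := Nat.le_of_succ_le_succ h
      by_cases hc : c = p
      · subst hc
        simp only [PySem.Chars.replace.go, List.isPrefixOf, beq_self_eq_true, Bool.and_self, if_pos, List.length_cons,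
          List.length_nil, List.drop_succ_cons, List.drop_zero, List.reverse_cons,
          List.reverse_nil, List.nil_append, List.map_cons]
        rw [show [q] ++ acc = q :: acc from rfl, ih f (q :: acc) h']
        simp
      · simp [PySem.Chars.replace.go, List.isPrefixOf, Ne.symm hc, hc, ih f (c :: acc) h']
theorem replace_single (p q : Char) (l : List Char) :
    PySem.Chars.replace l [p] [q] = l.map (fun c => if c = p then q else c) := by
  rw [PySem.Chars.replace]
  simp only [List.isEmpty_cons]
  exact replace_go_single p q l l.length [] le_rfl

-- one whole-string single-char replace pass composed over a list of characters
theorem foldl_replace_chars (ps : List Char) (l : List Char) :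
    ps.foldl (fun s p => PySem.Chars.replace s [p] ['-']) l
      = l.map (fun c => ps.foldl (fun c p => if c = p then '-' else c) c) := by
  induction ps generalizing l with
  | nil => simp
  | cons p ps ih =>
    rw [List.foldl_cons, replace_single, ih, List.map_map]
    simp [Function.comp]

-- pointwise: successive single-char substitutions by '-' collapse to a membership test
theorem foldl_subst_mem (ps : List Char) (c : Char) :
    ps.foldl (fun c p => if c = p then '-' else c) c
      = if ps.contains c then '-' else c := by
  induction ps generalizing c with
  | nil => simp
  | cons p ps ih =>
    simp only [List.foldl_cons, List.contains_cons]
    rcases eq_or_ne c p with h | h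
    · subst h
      simp only [beq_self_eq_true, Bool.true_or, if_pos]
      rw [ih]
      split <;> rfl
    · simp [h, ih]

-- string-level fold = ofList of the char-list-level fold
theorem foldl_replace_ofList (ps : List Char) (s : String) :
    ps.foldl (fun s p => String.ofList (PySem.Chars.replace s.toList [p] ['-'])) s
      = String.ofList (ps.foldl (fun l p => PySem.Chars.replace l [p] ['-']) s.toList) := by
  induction ps generalizing s with
  | nil => simp
  | cons p ps ih => simp [List.foldl_cons, ih]

-- ===== VERDICT (by name: the statement is the Claim_ definition above) =====
theorem ClearName_spec : Claim_equal_ClearName := by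
  intro name _
  unfold Spec_ClearName ClearName ClearName_alt
  rw [show (fun (acc : List Char) (i : Int) =>
        if punctChars.contains (PySem.List.pyGetD name.toList i ' ')
        then acc ++ ['-']
        else acc ++ [PySem.List.pyGetD name.toList i ' '])
      = (fun acc i => (fun acc x =>
          acc ++ [if punctChars.contains x then '-' else x]) acc
            (PySem.List.pyGetD name.toList i ' ')) from by
        funext acc i; by_cases h : PySem.List.pyGetD name.toList i ' ' ∈ punctChars <;> simp [h]]
  rw [show PySem.Str.len name = (name.toList.length : Int) from by simp [PySem.Str.len]]
  rw [PySem.List.foldl_pyRange_zero_pyGetD' name.toList ' '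
        (fun acc x => acc ++ [if punctChars.contains x then '-' else x]) []]
  rw [PySem.List.foldl_append_singleton_eq_map]
  simp only [List.nil_append]
  rw [show (fun (s : String) (p : Char) => PySem.Str.replace s (String.ofList [p]) "-")
      = (fun s p => String.ofList (PySem.Chars.replace s.toList [p] ['-'])) from by
        funext s p
        simp [PySem.Str.replace]]
  rw [foldl_replace_ofList]
  rw [foldl_replace_chars]
  exact congrArg String.ofList
    (List.map_congr_left fun c _ => (foldl_subst_mem punctChars c).symm)
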